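-- pv_equiv track=rewrite | github.com/lookinmin/CodingTest | 문자열/BOJ_17609.py | find
-- ===== SOURCE A (Python) =====
-- import math
--
-- def find(st):
--     if st == st[::-1]:
--         return 0
--     else:
--         start = list(st)
--         end = list(st)
--
--         for i in range(math.ceil(int(len(st)/2))):
--             if st[i] != st[-(i+1)]:         # 진행하다가 다른 부분의 위치를 빼버리기
--                 start.pop(i)                # 양쪽 다
--                 end.pop(-(i+1))
--
--                 if start == start[::-1]:
--                     return 1
--
--                 if end == end[::-1]:
--                     return 1
--
--                 return 2
-- ===== SOURCE B (Python) =====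
-- def find(st):
--     def is_pal(s, i, j):
--         while i < j:
--             if s[i] != s[j]:
--                 return False
--             i += 1
--             j -= 1
--         return True
--
--     i, j = 0, len(st) - 1
--     while i < j:
--         if st[i] != st[j]:
--             return 1 if (is_pal(st, i + 1, j) or is_pal(st, i, j - 1)) else 2
--         i += 1
--         j -= 1
--     return 0
-- ===== Notes on version B (the rewrite author's own statement) =====
-- stated objective: faster
-- what changed: Replaces A's reversed-copy comparisons and list.pop surgery with an in-place two-pointer scan plus an index-range palindrome helper, allocating no copies.
import Mathlib
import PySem

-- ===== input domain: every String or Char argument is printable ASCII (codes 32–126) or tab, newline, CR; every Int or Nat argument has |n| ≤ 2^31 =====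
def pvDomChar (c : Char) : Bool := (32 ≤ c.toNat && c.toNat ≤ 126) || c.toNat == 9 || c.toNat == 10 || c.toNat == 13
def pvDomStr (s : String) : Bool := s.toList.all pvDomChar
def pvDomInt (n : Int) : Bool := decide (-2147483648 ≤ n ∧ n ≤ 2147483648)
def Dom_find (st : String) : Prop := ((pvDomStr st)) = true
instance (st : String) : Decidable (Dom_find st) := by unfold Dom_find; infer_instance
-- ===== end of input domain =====

-- B replaces A's reversed-copy comparisons and list.pop surgery with an in-place
-- two-pointer scan plus an index-range palindrome helper (objective: faster, constant-factor: no copies/allocation).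


-- ===== PORT A =====
-- st[::-1] / lst[::-1]; slice? with step -1 never raises, so the getD default arm is unreachable
def pyRevStr (s : String) : String := (PySem.Str.slice? s none none (-1)).getD s
def pyRevList (xs : List Char) : List Char := (PySem.List.slice? xs none none (-1)).getD xs
-- lst.pop(i); every index A pops is in range, so the none (IndexError) arm is unreachable
def popAt (xs : List Char) (i : Int) : List Char := ((PySem.List.pop? xs i).getD (' ', xs)).2
-- A's for-loop over range(...): first mismatch returns; falling off the range never
-- happens for the ranges find passes (Python would return None there) — we give 0
def findLoopA (l : List Char) : List Int → Int
  | [] => 0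
  | i :: rest =>
    if PySem.List.pyGetD l i ' ' ≠ PySem.List.pyGetD l (-(i+1)) ' ' then
      -- start = list(st); start.pop(i);  end = list(st); end.pop(-(i+1))
      let startp := popAt l i
      let endp := popAt l (-(i+1))
      if startp = pyRevList startp then 1
      else if endp = pyRevList endp then 1
      else 2
    else findLoopA l rest

def find (st : String) : Int :=
  if st = pyRevStr st then 0
  else
    -- math.ceil(int(len(st)/2)) = len(st) // 2 (len(st) ≥ 0; float division exact here)
    findLoopA st.toList
      (PySem.List.pyRange 0 (PySem.Int.floordiv (PySem.Str.len st) 2) 1)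

-- ===== PORT B =====
-- is_pal(s, i, j): two-pointer palindrome test of s[i..j]; all indexed positions are
-- in range when called from find_alt, so pyGetD's default is unreachable
def isPalAlt (s : List Char) (i j : Int) : Bool :=
  if i < j then
    if PySem.List.pyGetD s i ' ' ≠ PySem.List.pyGetD s j ' ' then false
    else isPalAlt s (i+1) (j-1)
  else true
termination_by (j - i).toNat
decreasing_by omega

-- the main while-loop of B
def scanAlt (s : List Char) (i j : Int) : Int :=
  if i < j then
    if PySem.List.pyGetD s i ' ' ≠ PySem.List.pyGetD s j ' ' then
      if isPalAlt s (i+1) j || isPalAlt s i (j-1) then 1 else 2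
    else scanAlt s (i+1) (j-1)
  else 0
termination_by (j - i).toNat
decreasing_by omega

def find_alt (st : String) : Int := scanAlt st.toList 0 (PySem.Str.len st - 1)

-- ===== PRECONDITION & SPEC =====
def Spec_find (st : String) (out : Int) : Prop := out = find_alt st
instance (st : String) (out : Int) : Decidable (Spec_find st out) := by unfold Spec_find; infer_instance

-- ===== CLAIM (what is proved, stated in full; the proofs are below) =====
def Claim_equal_find : Prop := ∀ (st : String), Dom_find st → Spec_find st (find st)

-- ===== LEMMAS AND PROOFS =====

theorem pyRevList_eq (xs : List Char) : pyRevList xs = xs.reverse := by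
  simp [pyRevList, PySem.List.slice?_none_none_neg_one]

theorem pyRevStr_iff (s : String) : (s = pyRevStr s) ↔ s.toList = s.toList.reverse := by
  rw [pyRevStr, PySem.Str.slice?_none_none_neg_one]
  constructor
  · intro h
    conv_lhs => rw [h]
    simp
  · intro h
    apply String.toList_inj.mp
    simp [← h]

-- pyGetD at a Nat index in range
theorem pyGetD_nat (l : List Char) (i : Nat) (h : i < l.length) :
    PySem.List.pyGetD l (i:Int) ' ' = l[i] := by
  simp [PySem.List.pyGetD_natCast, List.getD_eq_getElem?_getD, List.getElem?_eq_getElem h]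

-- pop at a negative index
theorem pop?_neg (l : List Char) (k : Nat) (h0 : 0 < k) (h : k ≤ l.length) :
    PySem.List.pop? l (-(k:Int)) = some (l[l.length-k]'(by omega), l.eraseIdx (l.length-k)) := by
  unfold PySem.List.pop? PySem.List.pyIdx?
  simp only [show ¬ ((-(k:Int)) ≥ 0) by omega, if_false]
  rw [if_pos (show -(l.length:Int) ≤ -(k:Int) by omega)]
  simp [List.getElem?_eq_getElem (show l.length - k < l.length by omega)]

theorem popAt_nat (l : List Char) (i : Nat) (h : i < l.length) :
    popAt l (i:Int) = l.eraseIdx i := by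
  simp [popAt, PySem.List.pop?_natCast l i h]

theorem popAt_neg (l : List Char) (k : Nat) (h0 : 0 < k) (h : k ≤ l.length) :
    popAt l (-(k:Int)) = l.eraseIdx (l.length-k) := by
  simp [popAt, pop?_neg l k h0 h]

-- the symmetric-segment predicate: positions p ≤ q inside [a,b] paired across the centre agree
def SymSeg (l : List Char) (a b : Nat) : Prop :=
  ∀ p q : Nat, a ≤ p → p ≤ q → q ≤ b → p + q = a + b → l[p]? = l[q]?

-- isPalAlt decides SymSeg on in-range segments
theorem isPal_iff (l : List Char) :
    ∀ (m a b : Nat), b - a ≤ m → b < l.length →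
      (isPalAlt l (a:Int) (b:Int) = true ↔ SymSeg l a b) := by
  intro m
  induction m with
  | zero =>
    intro a b hm hb
    rw [isPalAlt, if_neg (show ¬((a:Int) < (b:Int)) by omega)]
    simp only [true_iff]
    intro p q h1 h2 h3 h4
    have : p = q := by omega
    subst this; rfl
  | succ m ih =>
    intro a b hm hb
    by_cases hab : a < b
    · rw [isPalAlt, if_pos (show (a:Int) < (b:Int) by exact_mod_cast hab)]
      have ha : a < l.length := by omega
      rw [pyGetD_nat l a ha, pyGetD_nat l b hb]
      by_cases hc : l[a] = l[b]
      · rw [if_neg (by simp [hc])]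
        rw [show ((a:Int)+1) = ((a+1:Nat):Int) by push_cast; ring,
            show ((b:Int)-1) = ((b-1:Nat):Int) by omega,
            ih (a+1) (b-1) (by omega) (by omega)]
        constructor
        · intro hs p q h1 h2 h3 h4
          by_cases hpa : p = a
          · have hqb : q = b := by omega
            subst hpa; subst hqb
            simp [List.getElem?_eq_getElem ha, List.getElem?_eq_getElem hb, hc]
          · exact hs p q (by omega) h2 (by omega) (by omega)
        · intro hs p q h1 h2 h3 h4
          exact hs p q (by omega) h2 (by omega) (by omega)
      · rw [if_pos hc]
        simp only [Bool.false_eq_true, false_iff]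
        intro hs
        have := hs a b le_rfl (by omega) le_rfl rfl
        rw [List.getElem?_eq_getElem ha, List.getElem?_eq_getElem hb] at this
        exact hc (Option.some.inj this)
    · rw [isPalAlt, if_neg (show ¬((a:Int) < (b:Int)) by omega)]
      simp only [true_iff]
      intro p q h1 h2 h3 h4
      have : p = q := by omega
      subst this; rfl

-- a list equals its reverse iff symmetric pairs agree
theorem eq_reverse_iff (xs : List Char) :
    xs = xs.reverse ↔
      ∀ p q : Nat, p ≤ q → q < xs.length → p + q + 1 = xs.length → xs[p]? = xs[q]? := by
  constructor
  · intro h p q hpq hq hsum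
    conv_lhs => rw [h]
    rw [List.getElem?_reverse (by omega)]
    congr 1
    omega
  · intro h
    apply List.ext_getElem?
    intro i
    by_cases hi : i < xs.length
    · rw [List.getElem?_reverse hi]
      rcases Nat.lt_or_ge (xs.length - 1 - i) i with hlt | hle
      · exact (h (xs.length - 1 - i) i (by omega) hi (by omega)).symm
      · exact h i (xs.length - 1 - i) hle (by omega) (by omega)
    · rw [List.getElem?_eq_none (by omega), List.getElem?_eq_none (by simp; omega)]

-- with the prefix below i already matched, popping index i leaves a palindrome iff
-- the untouched middle segment [i+1, n-1-i] is symmetric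
theorem erase_left_iff (l : List Char) (i : Nat)
    (hpre : ∀ k, k < i → l[k]? = l[l.length-1-k]?) (hlt : 2*i + 1 < l.length) :
    (l.eraseIdx i = (l.eraseIdx i).reverse) ↔ SymSeg l (i+1) (l.length-1-i) := by
  have hlen : (l.eraseIdx i).length = l.length - 1 := by
    rw [List.length_eraseIdx]; simp only [if_pos (show i < l.length by omega)]
  rw [eq_reverse_iff]
  constructor
  · intro h p q h1 h2 h3 h4
    have hh := h (p-1) (q-1) (by omega) (by omega) (by omega)
    rw [List.getElem?_eraseIdx, List.getElem?_eraseIdx,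
        if_neg (by omega), if_neg (by omega),
        show p-1+1 = p by omega, show q-1+1 = q by omega] at hh
    exact hh
  · intro hs p q h1 h2 h3
    rw [hlen] at h2 h3
    rw [List.getElem?_eraseIdx, List.getElem?_eraseIdx]
    by_cases hp : p < i
    · rw [if_pos hp, if_neg (show ¬ q < i by omega)]
      have hh := hpre p hp
      rw [show l.length-1-p = q+1 by omega] at hh
      exact hh
    · rw [if_neg hp, if_neg (by omega)]
      exact hs (p+1) (q+1) (by omega) (by omega) (by omega) (by omega)

theorem erase_right_iff (l : List Char) (i : Nat)
    (hpre : ∀ k, k < i → l[k]? = l[l.length-1-k]?) (hlt : 2*i + 1 < l.length) :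
    (l.eraseIdx (l.length-1-i) = (l.eraseIdx (l.length-1-i)).reverse) ↔ SymSeg l i (l.length-2-i) := by
  have hlen : (l.eraseIdx (l.length-1-i)).length = l.length - 1 := by
    rw [List.length_eraseIdx]; simp only [if_pos (show l.length-1-i < l.length by omega)]
  rw [eq_reverse_iff]
  constructor
  · intro h p q h1 h2 h3 h4
    have hh := h p q h2 (by omega) (by omega)
    rw [List.getElem?_eraseIdx, List.getElem?_eraseIdx,
        if_pos (by omega), if_pos (by omega)] at hh
    exact hh
  · intro hs p q h1 h2 h3
    rw [hlen] at h2 h3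
    rw [List.getElem?_eraseIdx, List.getElem?_eraseIdx]
    by_cases hq : q < l.length-1-i
    · rw [if_pos (by omega), if_pos hq]
      exact hs p q (by omega) h1 (by omega) (by omega)
    · rw [if_pos (by omega), if_neg hq]
      have hh := hpre p (by omega)
      rw [show l.length-1-p = q+1 by omega] at hh
      exact hh

-- the two loops agree from any synchronised position with matched prefix
theorem loop_eq (l : List Char) :
    ∀ (c i : Nat), l.length/2 - i ≤ c →
      (∀ k, k < i → l[k]? = l[l.length-1-k]?) →
      findLoopA l (PySem.List.pyRange (i:Int) ((l.length/2 : Nat):Int) 1)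
        = scanAlt l (i:Int) ((l.length:Int) - 1 - (i:Int)) := by
  have hbase : ∀ i : Nat, l.length/2 ≤ i →
      findLoopA l (PySem.List.pyRange (i:Int) ((l.length/2 : Nat):Int) 1)
        = scanAlt l (i:Int) ((l.length:Int) - 1 - (i:Int)) := by
    intro i hi
    rw [PySem.List.pyRange_one_eq_nil (by omega), scanAlt,
        if_neg (show ¬((i:Int) < (l.length:Int) - 1 - (i:Int)) by omega)]
    rfl
  intro c
  induction c with
  | zero =>
    intro i hc hpre
    exact hbase i (by omega)
  | succ c ih =>
    intro i hc hpre
    by_cases hi : i < l.length/2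
    · have h2i : 2*i + 2 ≤ l.length := by omega
      have hil : i < l.length := by omega
      have hjn : l.length-1-i < l.length := by omega
      rw [PySem.List.pyRange_one_cons (by omega), findLoopA, scanAlt,
          show ((l.length:Int) - 1 - (i:Int)) = ((l.length-1-i : Nat):Int) by omega,
          show -((i:Int)+1) = -(((i+1:Nat)):Int) by push_cast; ring,
          PySem.List.pyGetD_neg_natCast l (i+1) ' ' (by omega) (by omega),
          pyGetD_nat l i hil, pyGetD_nat l (l.length-1-i) hjn,
          if_pos (show (i:Int) < ((l.length-1-i:Nat):Int) by omega)]
      simp only [show l.length - (i+1) = l.length-1-i from by omega]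
      by_cases hc2 : l[i] = l[l.length-1-i]
      · rw [if_neg (by simp [hc2]), if_neg (by simp [hc2]),
            show ((i:Int)+1) = ((i+1:Nat):Int) by push_cast; ring,
            show ((l.length-1-i:Nat):Int) - 1 = (l.length:Int) - 1 - ((i+1:Nat):Int) by omega]
        apply ih (i+1) (by omega)
        intro k hk
        rcases Nat.lt_or_ge k i with h | h
        · exact hpre k h
        · rw [show k = i by omega, List.getElem?_eq_getElem hil,
              List.getElem?_eq_getElem hjn, hc2]
      · rw [if_pos hc2, if_pos hc2]
        simp only [popAt_nat l i hil,
          show popAt l (-(((i+1:Nat)):Int)) = l.eraseIdx (l.length-1-i) from by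
            rw [popAt_neg l (i+1) (by omega) (by omega)]
            congr 1
            omega,
          pyRevList_eq]
        have hA1 := erase_left_iff l i hpre (by omega)
        have hA2 := erase_right_iff l i hpre (by omega)
        have hB1 := isPal_iff l l.length (i+1) (l.length-1-i) (by omega) (by omega)
        have hB2 := isPal_iff l l.length i (l.length-2-i) (by omega) (by omega)
        rw [show ((i:Int)+1) = ((i+1:Nat):Int) by push_cast; ring,
            show ((l.length-1-i:Nat):Int) - 1 = ((l.length-2-i:Nat):Int) by omega]
        by_cases c1 : isPalAlt l ((i+1:Nat):Int) ((l.length-1-i:Nat):Int) = true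
        · rw [if_pos (hA1.mpr (hB1.mp c1)), if_pos (show _ = true by rw [c1]; rfl)]
        · have c1f := eq_false_of_ne_true c1
          rw [if_neg (fun h => c1 (hB1.mpr (hA1.mp h)))]
          by_cases c2 : isPalAlt l ((i:Nat):Int) ((l.length-2-i:Nat):Int) = true
          · rw [if_pos (hA2.mpr (hB2.mp c2)), if_pos (show _ = true by rw [c1f, c2]; rfl)]
          · have c2f := eq_false_of_ne_true c2
            rw [if_neg (fun h => c2 (hB2.mpr (hA2.mp h))), if_neg (show ¬(_ = true) by rw [c1f, c2f]; decide)]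
    · exact hbase i (by omega)

-- on a palindrome A's loop falls through (no mismatch is ever found)
theorem loopA_of_pal (l : List Char) (hp : l = l.reverse) :
    ∀ (is : List Int), (∀ i ∈ is, 0 ≤ i ∧ i < ((l.length/2 : Nat):Int)) →
      findLoopA l is = 0 := by
  intro is
  induction is with
  | nil => intro _; rfl
  | cons i rest ih =>
    intro h
    obtain ⟨h0, hlt⟩ := h i (by simp)
    rw [show i = ((i.toNat:Nat):Int) by omega] at hlt ⊢
    have hk : i.toNat < l.length/2 := by exact_mod_cast hlt
    have hkl : i.toNat < l.length := by omega
    have hchar : l[i.toNat] = l[l.length-1-i.toNat]'(by omega) := by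
      have hh := (eq_reverse_iff l).mp hp i.toNat (l.length-1-i.toNat) (by omega) (by omega) (by omega)
      rw [List.getElem?_eq_getElem hkl, List.getElem?_eq_getElem (by omega)] at hh
      exact Option.some.inj hh
    rw [findLoopA, pyGetD_nat l i.toNat hkl]
    rw [show -(((i.toNat:Nat):Int)+1) = -(((i.toNat+1:Nat)):Int) by push_cast; ring,
        PySem.List.pyGetD_neg_natCast l (i.toNat+1) ' ' (by omega) (by omega)]
    simp only [show l.length - (i.toNat+1) = l.length-1-i.toNat from by omega]
    rw [if_neg (by simp [hchar])]
    exact ih (fun j hj => h j (by simp [hj]))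

theorem find_eq_alt (st : String) : find st = find_alt st := by
  unfold find find_alt
  rw [PySem.Str.len_eq]
  have hfd : PySem.Int.floordiv ((st.toList.length:Nat):Int) 2
      = ((st.toList.length/2:Nat):Int) := by
    rw [PySem.Int.floordiv_eq_ediv_of_pos (by omega)]
    omega
  have hle := loop_eq st.toList (st.toList.length/2) 0 (by omega)
    (fun k hk => absurd hk (Nat.not_lt_zero k))
  simp only [Nat.cast_zero, sub_zero] at hle
  by_cases hp : st = pyRevStr st
  · rw [if_pos hp]
    have h0 := loopA_of_pal st.toList ((pyRevStr_iff st).mp hp)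
      (PySem.List.pyRange 0 ((st.toList.length/2:Nat):Int) 1)
      (fun x hx => by
        have := PySem.List.mem_pyRange_one.mp hx
        exact ⟨this.1, this.2⟩)
    rw [← hle, h0]
  · rw [if_neg hp, hfd]
    exact hle

-- ===== VERDICT (by name: the statement is the Claim_ definition above) =====
theorem find_spec : Claim_equal_find := by
  intro st _
  unfold Spec_find
  exact find_eq_alt st
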